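-- pv_equiv track=rewrite | github.com/pinocchio-life-like/Competitive-Programming | Number of Smooth Descent Periods of stocks.py | getDescentPriods
-- ===== SOURCE A (Python) =====
-- def getDescentPriods(prices):
--     length=len(prices)
--     if length==1:
--         return 1
--     arr=[1 for _ in range(length)]
--     for i in range(1,length):
--         if prices[i]+1==prices[i-1]:
--             arr[i]+=arr[i-1]
--     return sum(arr)
-- ===== SOURCE B (Python) =====
-- def getDescentPriods(prices):
--     if not prices:
--         return 0
--     total = 0
--     run = 1
--     for i in range(1, len(prices)):
--         if prices[i] + 1 == prices[i - 1]:
--             run += 1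
--         else:
--             total += run * (run + 1) // 2
--             run = 1
--     total += run * (run + 1) // 2
--     return total
-- ===== Notes on version B (the rewrite author's own statement) =====
-- stated objective: alternative
-- what changed: Replaced the per-index DP array (allocate arr of length n, update arr[i], then sum it) by a single scan that tracks the current descent-run length and adds the closed-form triangular number run*(run+1)//2 at each run boundary; it trades the O(n) auxiliary array for O(1) state.
import Mathlib
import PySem

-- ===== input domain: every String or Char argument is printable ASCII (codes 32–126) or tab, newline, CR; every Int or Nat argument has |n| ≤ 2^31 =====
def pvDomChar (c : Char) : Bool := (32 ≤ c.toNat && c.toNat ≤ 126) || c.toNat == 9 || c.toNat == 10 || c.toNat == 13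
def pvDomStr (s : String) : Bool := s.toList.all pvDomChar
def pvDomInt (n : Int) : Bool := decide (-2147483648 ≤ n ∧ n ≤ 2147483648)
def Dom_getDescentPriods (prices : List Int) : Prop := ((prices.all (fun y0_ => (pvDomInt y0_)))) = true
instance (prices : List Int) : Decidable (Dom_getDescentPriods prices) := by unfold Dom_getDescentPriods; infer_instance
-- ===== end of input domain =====

-- B replaces A's per-index DP array by a single scan tracking the current descent-run
-- length and adding run*(run+1)//2 per run (alternative decomposition, O(1) state); return values proved equal.

-- ===== PORT A =====
def getDescentPriods (prices : List Int) : Int :=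
  let length : Int := prices.length
  if length = 1 then 1
  else
    let arr : List Int := (PySem.List.pyRange 0 length 1).map (fun _ => 1)
    -- arr[i] += arr[i-1]: i comes from range(1, length), so it is a nonnegative in-range
    -- index and List.set i.toNat is exact for Python's arr[i] = … here
    let arr := (PySem.List.pyRange 1 length 1).foldl
      (fun arr i =>
        if PySem.List.pyGetD prices i 0 + 1 = PySem.List.pyGetD prices (i - 1) 0 then
          arr.set i.toNat (PySem.List.pyGetD arr i 0 + PySem.List.pyGetD arr (i - 1) 0)
        else arr) arr
    arr.sum

-- ===== PORT B =====
def getDescentPriods_alt (prices : List Int) : Int :=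
  if prices = [] then 0
  else
    let s := (PySem.List.pyRange 1 (prices.length : Int) 1).foldl
      (fun (tr : Int × Int) i =>
        if PySem.List.pyGetD prices i 0 + 1 = PySem.List.pyGetD prices (i - 1) 0 then
          (tr.1, tr.2 + 1)
        else
          (tr.1 + PySem.Int.floordiv (tr.2 * (tr.2 + 1)) 2, 1)) ((0 : Int), (1 : Int))
    s.1 + PySem.Int.floordiv (s.2 * (s.2 + 1)) 2

-- ===== PRECONDITION & SPEC =====
def Spec_getDescentPriods (prices : List Int) (out : Int) : Prop := out = getDescentPriods_alt prices
instance (prices : List Int) (out : Int) : Decidable (Spec_getDescentPriods prices out) := by unfold Spec_getDescentPriods; infer_instance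

-- ===== CLAIM (what is proved, stated in full; the proofs are below) =====
def Claim_equal_getDescentPriods : Prop := ∀ (prices : List Int), Dom_getDescentPriods prices → Spec_getDescentPriods prices (getDescentPriods prices)

-- ===== LEMMAS AND PROOFS =====

-- the DP value at index j: length of the descent run ending at j
def pvV (prices : List Int) : Nat → Int
  | 0 => 1
  | j + 1 =>
    if PySem.List.pyGetD prices ((j : Int) + 1) 0 + 1 = PySem.List.pyGetD prices ((j : Int) + 1 - 1) 0
    then pvV prices j + 1 else 1

def pvT (r : Int) : Int := PySem.Int.floordiv (r * (r + 1)) 2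

def pvS (prices : List Int) (k : Nat) : Int := ((List.range (k + 1)).map (pvV prices)).sum

lemma pvT_succ (r : Int) : pvT (r + 1) = pvT r + (r + 1) := by
  unfold pvT
  rw [PySem.Int.floordiv_eq_ediv_of_pos (a := (r + 1) * (r + 1 + 1)) (by norm_num),
      PySem.Int.floordiv_eq_ediv_of_pos (a := r * (r + 1)) (by norm_num)]
  have h : (r + 1) * (r + 1 + 1) = r * (r + 1) + (r + 1) * 2 := by ring
  rw [h, Int.add_mul_ediv_right _ _ (by norm_num)]

lemma pvT_one : pvT 1 = 1 := by decide

lemma set_map_range {α : Type} (n m : Nat) (f : Nat → α) (x : α) (_hm : m < n) :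
    ((List.range n).map f).set m x = (List.range n).map (fun j => if j = m then x else f j) := by
  apply List.ext_getElem
  · simp
  · intro i h1 h2
    simp only [List.getElem_set, List.getElem_map, List.getElem_range]
    by_cases h : m = i
    · subst h; simp
    · rw [if_neg h, if_neg (fun hh => h hh.symm)]

lemma pvGetD_map_range {α : Type} (n k : Nat) (f : Nat → α) (d : α) (hk : k < n) :
    PySem.List.pyGetD ((List.range n).map f) (k : Int) d = f k := by
  rw [PySem.List.pyGetD_natCast]
  simp [List.getD, hk]

lemma A_inv (prices : List Int) (k : Nat) (hk : k < prices.length) :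
    (PySem.List.pyRange 1 ((k : Int) + 1) 1).foldl
      (fun arr i =>
        if PySem.List.pyGetD prices i 0 + 1 = PySem.List.pyGetD prices (i - 1) 0 then
          arr.set i.toNat (PySem.List.pyGetD arr i 0 + PySem.List.pyGetD arr (i - 1) 0)
        else arr)
      ((PySem.List.pyRange 0 (prices.length : Int) 1).map (fun _ => (1 : Int)))
    = (List.range prices.length).map (fun j => if j ≤ k then pvV prices j else 1) := by
  induction k with
  | zero =>
    have h1 : ((0 : Nat) : Int) + 1 = 1 := by norm_num
    rw [h1, PySem.List.pyRange_one_eq_nil (le_refl 1), List.foldl_nil,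
        PySem.List.pyRange_zero_nat, List.map_map]
    apply List.map_congr_left
    intro j _
    cases j <;> simp [pvV]
  | succ k ih =>
    have hk' : k < prices.length := by omega
    have hsplit : PySem.List.pyRange 1 ((↑(k + 1) : Int) + 1) 1
        = PySem.List.pyRange 1 ((k : Int) + 1) 1 ++ [(k : Int) + 1] := by
      have h : ((↑(k + 1) : Int) + 1) = ((k : Int) + 1) + 1 := by omega
      rw [h, PySem.List.pyRange_one_succ_right (by omega)]
    rw [hsplit, List.foldl_append, ih hk']
    simp only [List.foldl_cons, List.foldl_nil]
    have hcast' : ((k : Int) + 1 - 1) = ((k : Nat) : Int) := by omega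
    have hcast : ((k : Int) + 1) = ((k + 1 : Nat) : Int) := by omega
    by_cases hc : PySem.List.pyGetD prices ((k : Int) + 1) 0 + 1
        = PySem.List.pyGetD prices ((k : Int) + 1 - 1) 0
    · rw [if_pos hc, hcast', hcast,
          pvGetD_map_range _ _ _ _ (by omega : k + 1 < prices.length),
          pvGetD_map_range _ _ _ _ hk',
          show ((k + 1 : Nat) : Int).toNat = k + 1 from by omega,
          set_map_range _ _ _ _ (by omega : k + 1 < prices.length)]
      have hv : pvV prices (k + 1) = pvV prices k + 1 := by
        simp only [pvV]; rw [if_pos hc]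
      apply List.map_congr_left
      intro j _
      by_cases h1 : j = k + 1
      · subst h1
        rw [if_pos rfl, if_pos (le_refl (k + 1)), hv,
            if_neg (by omega : ¬ k + 1 ≤ k), if_pos (le_refl k)]
        ring
      · rw [if_neg h1]
        by_cases h2 : j ≤ k
        · rw [if_pos h2, if_pos (by omega : j ≤ k + 1)]
        · rw [if_neg h2, if_neg (by omega : ¬ j ≤ k + 1)]
    · rw [if_neg hc]
      have hv : pvV prices (k + 1) = 1 := by
        simp only [pvV]; rw [if_neg hc]
      apply List.map_congr_left
      intro j _
      by_cases h1 : j = k + 1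
      · subst h1
        rw [if_neg (by omega : ¬ k + 1 ≤ k), if_pos (le_refl (k + 1)), hv]
      · by_cases h2 : j ≤ k
        · rw [if_pos h2, if_pos (by omega : j ≤ k + 1)]
        · rw [if_neg h2, if_neg (by omega : ¬ j ≤ k + 1)]

lemma B_inv (prices : List Int) (k : Nat) (hk : k < prices.length) :
    (PySem.List.pyRange 1 ((k : Int) + 1) 1).foldl
      (fun (tr : Int × Int) i =>
        if PySem.List.pyGetD prices i 0 + 1 = PySem.List.pyGetD prices (i - 1) 0 then
          (tr.1, tr.2 + 1)
        else
          (tr.1 + PySem.Int.floordiv (tr.2 * (tr.2 + 1)) 2, 1)) ((0 : Int), (1 : Int))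
    = (pvS prices k - pvT (pvV prices k), pvV prices k) := by
  induction k with
  | zero =>
    have h1 : ((0 : Nat) : Int) + 1 = 1 := by norm_num
    rw [h1, PySem.List.pyRange_one_eq_nil (le_refl 1), List.foldl_nil]
    have hv : pvV prices 0 = 1 := rfl
    rw [hv, pvT_one]
    simp [pvS, pvV]
  | succ k ih =>
    have hk' : k < prices.length := by omega
    have hsplit : PySem.List.pyRange 1 ((↑(k + 1) : Int) + 1) 1
        = PySem.List.pyRange 1 ((k : Int) + 1) 1 ++ [(k : Int) + 1] := by
      have h : ((↑(k + 1) : Int) + 1) = ((k : Int) + 1) + 1 := by omega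
      rw [h, PySem.List.pyRange_one_succ_right (by omega)]
    rw [hsplit, List.foldl_append, ih hk']
    simp only [List.foldl_cons, List.foldl_nil]
    have hS : pvS prices (k + 1) = pvS prices k + pvV prices (k + 1) := by
      simp only [pvS, List.range_succ, List.map_append, List.sum_append, List.map_cons,
        List.sum_cons, List.map_nil, List.sum_nil]
      ring
    by_cases hc : PySem.List.pyGetD prices ((k : Int) + 1) 0 + 1
        = PySem.List.pyGetD prices ((k : Int) + 1 - 1) 0
    · rw [if_pos hc]
      have hv : pvV prices (k + 1) = pvV prices k + 1 := by
        simp only [pvV]; rw [if_pos hc]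
      rw [hS, hv, pvT_succ]
      simp only [Prod.mk.injEq]
      exact ⟨by ring, trivial⟩
    · rw [if_neg hc]
      have hv : pvV prices (k + 1) = 1 := by
        simp only [pvV]; rw [if_neg hc]
      rw [hS, hv, pvT_one]
      simp only [Prod.mk.injEq]
      exact ⟨by unfold pvT; ring, trivial⟩

-- ===== VERDICT (by name: the statement is the Claim_ definition above) =====
theorem getDescentPriods_spec : Claim_equal_getDescentPriods := by
  intro prices _
  unfold Spec_getDescentPriods
  by_cases h0 : prices = []
  · subst h0; decide
  · have hn : 0 < prices.length := List.length_pos_iff.mpr h0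
    by_cases h1 : prices.length = 1
    · simp only [getDescentPriods, getDescentPriods_alt, if_neg h0,
        if_pos (show ((prices.length : Int)) = 1 by rw [h1]; norm_num)]
      rw [show ((prices.length : Int)) = 1 from by rw [h1]; norm_num,
          PySem.List.pyRange_one_eq_nil (le_refl 1), List.foldl_nil]
      decide
    · have h2 : 2 ≤ prices.length := by omega
      simp only [getDescentPriods, getDescentPriods_alt, if_neg h0,
        if_neg (show ¬ ((prices.length : Int)) = 1 by omega)]
      rw [show PySem.List.pyRange 1 ((prices.length : Int)) 1
            = PySem.List.pyRange 1 (((prices.length - 1 : Nat) : Int) + 1) 1 from by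
          congr 1; omega]
      rw [A_inv prices (prices.length - 1) (by omega),
          B_inv prices (prices.length - 1) (by omega)]
      rw [List.map_congr_left (fun j hj => by
        rw [if_pos (by
          have := List.mem_range.mp hj
          omega : j ≤ prices.length - 1)])]
      rw [show PySem.Int.floordiv
            (pvV prices (prices.length - 1) * (pvV prices (prices.length - 1) + 1)) 2
          = pvT (pvV prices (prices.length - 1)) from rfl,
          sub_add_cancel]
      unfold pvS
      rw [show prices.length - 1 + 1 = prices.length from by omega]
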